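-- pv_equiv track=rewrite | github.com/alextoritsin/Algorithms-Specialization | 01_Algorithmic_toolbox/week3/different_summands.py | get_prizes_list
-- ===== SOURCE A (Python) =====
-- def get_prizes_list(n):
--     prizes = []
--     prize = 1
--
--     while n != 0:
--
--         if n - prize > prize:
--             prizes.append(prize)
--             n -= prize
--             prize += 1
--         else:
--             prizes.append(n)
--             n = 0
--     return [str(i) for i in prizes]
-- ===== SOURCE B (Python) =====
-- def get_prizes_list(n):
--     if n <= 0:
--         return [] if n == 0 else [str(n)]
--     # largest k with k*(k+1)//2 <= n, found by stepping the triangular bound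
--     k = 1
--     while (k + 1) * (k + 2) <= 2 * n:
--         k += 1
--     return [str(i) for i in range(1, k)] + [str(n - k * (k - 1) // 2)]
-- ===== Notes on version B (the rewrite author's own statement) =====
-- stated objective: alternative
-- what changed: Instead of greedily subtracting growing prizes from n, B first locates the boundary k (the largest k with k(k+1)/2 <= n) by stepping a triangular-number condition, then emits range(1,k) plus the closed-form remainder n - k(k-1)/2.
import Mathlib
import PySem

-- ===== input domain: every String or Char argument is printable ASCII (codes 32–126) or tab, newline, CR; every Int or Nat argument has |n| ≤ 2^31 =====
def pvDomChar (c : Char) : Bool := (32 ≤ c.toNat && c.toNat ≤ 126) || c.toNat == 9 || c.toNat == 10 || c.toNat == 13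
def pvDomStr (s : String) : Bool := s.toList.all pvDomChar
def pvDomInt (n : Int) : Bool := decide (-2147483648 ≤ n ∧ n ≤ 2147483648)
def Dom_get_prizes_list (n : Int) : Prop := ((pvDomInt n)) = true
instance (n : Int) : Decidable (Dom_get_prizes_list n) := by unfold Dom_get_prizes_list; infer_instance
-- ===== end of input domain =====

-- B replaces A's greedy subtraction loop by first locating the boundary k (largest k with
-- k(k+1)/2 ≤ n) and then emitting range(1,k) plus the closed-form remainder; objective: alternative.

-- ===== PORT A =====
-- while-loop of A as recursion over the mutated state (n, prize, prizes);
-- fuel is a totality guard only: n.toNat + 1 steps always suffice (prize ≥ 1 makes n drop each step)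
def goA (fuel : Nat) (n : Int) (prize : Int) (prizes : List Int) : List Int :=
  match fuel with
  | 0 => prizes
  | fuel + 1 =>
    if n ≠ 0 then
      if n - prize > prize then goA fuel (n - prize) (prize + 1) (prizes ++ [prize])
      else prizes ++ [n]
    else prizes

def get_prizes_list (n : Int) : List String :=
  (goA (n.toNat + 1) n 1 []).map PySem.Int.toStr

-- ===== PORT B =====
-- the while-loop of Source B stepping k while (k+1)(k+2) ≤ 2n; fuel is a totality guard only
-- (n.toNat steps suffice: k would otherwise exceed n, where the condition already fails)
def findK (fuel : Nat) (n : Int) (k : Int) : Int :=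
  match fuel with
  | 0 => k
  | fuel + 1 => if (k + 1) * (k + 2) ≤ 2 * n then findK fuel n (k + 1) else k

def get_prizes_list_alt (n : Int) : List String :=
  if n ≤ 0 then (if n = 0 then [] else [PySem.Int.toStr n])
  else
    let k := findK n.toNat n 1
    (PySem.List.pyRange 1 k 1).map PySem.Int.toStr
      ++ [PySem.Int.toStr (n - PySem.Int.floordiv (k * (k - 1)) 2)]

-- ===== PRECONDITION & SPEC =====
def Spec_get_prizes_list (n : Int) (out : List String) : Prop := out = get_prizes_list_alt n
instance (n : Int) (out : List String) : Decidable (Spec_get_prizes_list n out) := by unfold Spec_get_prizes_list; infer_instance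

-- ===== CLAIM (what is proved, stated in full; the proofs are below) =====
def Claim_equal_get_prizes_list : Prop := ∀ (n : Int), Dom_get_prizes_list n → Spec_get_prizes_list n (get_prizes_list n)

-- ===== LEMMAS AND PROOFS =====

-- findK produces the largest k with k(k+1) ≤ 2n, given enough fuel (n ≤ k + fuel)
theorem findK_spec (n : Int) : ∀ (fuel : Nat) (k : Int), 1 ≤ k → k * (k + 1) ≤ 2 * n →
    n ≤ k + fuel →
    k ≤ findK fuel n k ∧ (findK fuel n k) * (findK fuel n k + 1) ≤ 2 * n ∧
      2 * n < (findK fuel n k + 1) * (findK fuel n k + 2) := by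
  intro fuel
  induction fuel with
  | zero =>
    intro k hk1 hlo hfu
    have hfu' : n ≤ k := by push_cast at hfu; omega
    have : 2 * n < (k + 1) * (k + 2) := by nlinarith [sq_nonneg k]
    exact ⟨le_refl _, hlo, by simpa [findK] using this⟩
  | succ f ih =>
    intro k hk1 hlo hfu
    rw [findK]
    by_cases hstep : (k + 1) * (k + 2) ≤ 2 * n
    · rw [if_pos hstep]
      have := ih (k + 1) (by omega) (by nlinarith [hstep]) (by push_cast at hfu ⊢; omega)
      exact ⟨by omega, this.2.1, this.2.2⟩
    · rw [if_neg hstep]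
      exact ⟨le_refl _, hlo, by omega⟩

-- the greedy loop, characterised by the boundary k:
-- with p ≤ k, k(k+1) ≤ 2n + p(p-1) < (k+1)(k+2), it emits p,…,k-1 and the remainder e
theorem goA_eq (k : Int) : ∀ (fuel : Nat) (n p e : Int) (acc : List Int), 1 ≤ p → p ≤ k →
    k * (k + 1) ≤ 2 * n + p * (p - 1) → 2 * n + p * (p - 1) < (k + 1) * (k + 2) →
    2 * e = 2 * n + p * (p - 1) - k * (k - 1) → (k - p).toNat < fuel →
    goA fuel n p acc = acc ++ PySem.List.pyRange p k 1 ++ [e] := by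
  intro fuel
  induction fuel with
  | zero => intro n p e acc _ _ _ _ _ hfu; omega
  | succ f ih =>
    intro n p e acc hp1 hpk hlo hhi he hfu
    have hn : p ≤ n := by nlinarith
    rw [goA, if_pos (by omega)]
    by_cases hbr : n - p > p
    · -- loop step: k > p, emit p and continue
      have hkp : p + 1 ≤ k := by
        rcases lt_or_eq_of_le hpk with h | h
        · omega
        · exfalso; subst h; nlinarith
      rw [if_pos hbr]
      have harith : (p + 1) * (p + 1 - 1) = p * (p - 1) + 2 * p := by ring
      rw [ih (n - p) (p + 1) e (acc ++ [p])
            (by omega) hkp (by omega) (by omega) (by omega) (by omega)]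
      rw [PySem.List.pyRange_one_cons (by omega : p < k)]
      simp
    · -- loop exit: k = p, emit the remainder n
      rw [if_neg hbr]
      have hkp : k = p := by
        rcases lt_or_eq_of_le hpk with h | h
        · exfalso; nlinarith
        · omega
      subst hkp
      have hrange : PySem.List.pyRange k k 1 = [] := PySem.List.pyRange_one_eq_nil (by omega)
      have hen : e = n := by omega
      rw [hrange, hen]; simp

theorem get_prizes_list_spec : Claim_equal_get_prizes_list := by
  intro n _
  unfold Spec_get_prizes_list get_prizes_list get_prizes_list_alt
  by_cases h0 : n ≤ 0
  · rw [if_pos h0]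
    by_cases hz : n = 0
    · subst hz; rw [goA, if_neg (by omega)]; simp
    · rw [goA, if_pos hz, if_neg (by omega), if_neg hz]; simp
  · rw [if_neg h0]
    have h1 : 1 ≤ n := by omega
    obtain ⟨hk1, hlo, hhi⟩ := findK_spec n n.toNat 1 (by omega) (by omega) (by omega)
    set k := findK n.toNat n 1 with hk
    have hkn : k ≤ n := by nlinarith
    have heven : 2 ∣ k * (k - 1) := by
      rcases Int.even_or_odd k with ⟨m, hm⟩ | ⟨m, hm⟩
      · exact ⟨m * (k - 1), by rw [hm]; ring⟩
      · exact ⟨k * m, by rw [hm]; ring⟩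
    have hfd : PySem.Int.floordiv (k * (k - 1)) 2 = (k * (k - 1)) / 2 := by
      simp [PySem.Int.floordiv]
      exact Int.fdiv_eq_ediv_of_nonneg _ (by norm_num)
    rw [goA_eq k (n.toNat + 1) n 1 (n - PySem.Int.floordiv (k * (k - 1)) 2) [] (by omega) hk1
          (by omega) (by omega)
          (by rw [hfd]; have := Int.ediv_mul_cancel heven; omega) (by omega)]
    simp

-- ===== VERDICT (by name: the statement is the Claim_ definition above) =====
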